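-- pv_equiv track=rewrite | github.com/markpollack/code-coverage-experiment | scripts/make_tables.py | to_booktabs
-- ===== SOURCE A (Python) =====
-- def to_booktabs(body: str) -> str:
--     """Replace \\hline with \\toprule, \\midrule, \\bottomrule."""
--     lines = body.split("\n")
--     hline_indices = [i for i, l in enumerate(lines) if l.strip() == r"\hline"]
--     if len(hline_indices) >= 3:
--         lines[hline_indices[0]] = r"\toprule"
--         lines[hline_indices[1]] = r"\midrule"
--         lines[hline_indices[2]] = r"\bottomrule"
--     elif len(hline_indices) == 2:
--         lines[hline_indices[0]] = r"\toprule"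
--         lines[hline_indices[1]] = r"\bottomrule"
--     return "\n".join(lines)
-- ===== SOURCE B (Python) =====
-- def to_booktabs(body: str) -> str:
--     """Replace \\hline with \\toprule, \\midrule, \\bottomrule."""
--     lines = body.split("\n")
--     total = sum(1 for l in lines if l.strip() == r"\hline")
--     out = []
--     seen = 0
--     for l in lines:
--         if l.strip() == r"\hline":
--             if total >= 3:
--                 if seen == 0:
--                     out.append(r"\toprule")
--                 elif seen == 1:
--                     out.append(r"\midrule")
--                 elif seen == 2:
--                     out.append(r"\bottomrule")
--                 else:
--                     out.append(l)
--             elif total == 2: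
--                 out.append(r"\toprule" if seen == 0 else r"\bottomrule")
--             else:
--                 out.append(l)
--             seen += 1
--         else:
--             out.append(l)
--     return "\n".join(out)
-- ===== Notes on version B (the rewrite author's own statement) =====
-- stated objective: alternative
-- what changed: Instead of collecting hline indices with enumerate and assigning into the list at those indices, B counts the hlines once and rebuilds the line list in a single pass with a running counter choosing each replacement.
import Mathlib
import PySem

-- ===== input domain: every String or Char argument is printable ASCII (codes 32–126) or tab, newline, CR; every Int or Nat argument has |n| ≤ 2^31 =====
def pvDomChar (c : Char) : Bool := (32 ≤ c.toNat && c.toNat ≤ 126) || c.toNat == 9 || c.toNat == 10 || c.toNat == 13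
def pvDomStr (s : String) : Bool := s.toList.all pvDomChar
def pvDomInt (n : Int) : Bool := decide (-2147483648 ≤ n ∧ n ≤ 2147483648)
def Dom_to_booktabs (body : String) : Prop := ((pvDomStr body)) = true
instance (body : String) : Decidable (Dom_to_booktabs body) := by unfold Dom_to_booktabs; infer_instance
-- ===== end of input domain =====

-- B replaces A's index-collect-then-assign pass by a single rebuild of the line list
-- with a running hline counter (objective: alternative decomposition, same cost).

-- shared predicate: l.strip() == r"\hline"
def pvIsHline (l : String) : Bool := PySem.Str.strip l == "\\hline"

-- ===== PORT A =====
-- enumerate indices are ≥ 0, so Int.toNat on them is exact;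
-- body.split("\n") = PySem.Str.split? body "\n", always `some` since the separator is nonempty
def to_booktabs (body : String) : String :=
  let lines := (PySem.Str.split? body "\n").getD []
  let hline_indices :=
    ((PySem.List.enumerate lines 0).filter (fun p => pvIsHline p.2)).map (·.1)
  let lines' :=
    match hline_indices with
    | i0 :: i1 :: i2 :: _ =>
        ((lines.set i0.toNat "\\toprule").set i1.toNat "\\midrule").set i2.toNat "\\bottomrule"
    | [i0, i1] =>
        (lines.set i0.toNat "\\toprule").set i1.toNat "\\bottomrule"
    | _ => lines
  PySem.Str.join "\n" lines'

-- ===== PORT B =====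
def pvRepl (l : String) (seen total : Nat) : String :=
  if 3 ≤ total then
    if seen = 0 then "\\toprule"
    else if seen = 1 then "\\midrule"
    else if seen = 2 then "\\bottomrule"
    else l
  else if total = 2 then
    (if seen = 0 then "\\toprule" else "\\bottomrule")
  else l

def pvGo (total : Nat) : List String → Nat → List String
  | [], _ => []
  | l :: ls, seen =>
    if pvIsHline l then pvRepl l seen total :: pvGo total ls (seen + 1)
    else l :: pvGo total ls seen

def to_booktabs_alt (body : String) : String :=
  let lines := (PySem.Str.split? body "\n").getD []
  let total := (lines.filter pvIsHline).length
  PySem.Str.join "\n" (pvGo total lines 0)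

-- ===== PRECONDITION & SPEC =====
def Spec_to_booktabs (body : String) (out : String) : Prop := out = to_booktabs_alt body
instance (body : String) (out : String) : Decidable (Spec_to_booktabs body out) := by unfold Spec_to_booktabs; infer_instance

-- ===== CLAIM (what is proved, stated in full; the proofs are below) =====
def Claim_equal_to_booktabs : Prop := ∀ (body : String), Dom_to_booktabs body → Spec_to_booktabs body (to_booktabs body)

-- ===== LEMMAS AND PROOFS =====

-- hline indices of `ls` when enumerated from start `s`
def pvIdxsF (ls : List String) (s : Int) : List Int :=
  ((PySem.List.enumerate ls s).filter (fun p => pvIsHline p.2)).map (·.1)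

def pvIdxs (ls : List String) : List Int := pvIdxsF ls 0

lemma pvIdxsF_nil (s : Int) : pvIdxsF [] s = [] := by
  simp [pvIdxsF, PySem.List.enumerate_nil]

lemma pvIdxsF_cons (l : String) (ls : List String) (s : Int) :
    pvIdxsF (l :: ls) s = (if pvIsHline l then [s] else []) ++ pvIdxsF ls (s + 1) := by
  by_cases h : pvIsHline l <;> simp [pvIdxsF, PySem.List.enumerate_cons, h]

lemma pvIdxsF_shift (ls : List String) : ∀ s : Int, pvIdxsF ls s = (pvIdxsF ls 0).map (· + s) := by
  induction ls with
  | nil => intro s; simp [pvIdxsF_nil]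
  | cons l ls ih =>
    intro s
    rw [pvIdxsF_cons, pvIdxsF_cons, ih (s + 1), ih (0 + 1)]
    simp only [List.map_append, List.map_map]
    congr 1
    · by_cases h : pvIsHline l <;> simp [h]
    · congr 1; funext i; simp; ring

lemma pvIdxs_cons (l : String) (ls : List String) :
    pvIdxs (l :: ls) =
      if pvIsHline l then 0 :: (pvIdxs ls).map (· + 1) else (pvIdxs ls).map (· + 1) := by
  rw [pvIdxs, pvIdxsF_cons, pvIdxsF_shift ls (0 + 1)]
  by_cases h : pvIsHline l <;> simp [h, pvIdxs]

lemma pvIdxs_nonneg (ls : List String) : ∀ i ∈ pvIdxs ls, 0 ≤ i := by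
  induction ls with
  | nil => simp [pvIdxs, pvIdxsF_nil]
  | cons l ls ih =>
    intro i hi
    rw [pvIdxs_cons] at hi
    by_cases h : pvIsHline l <;> simp [h] at hi
    · rcases hi with rfl | ⟨j, hj, rfl⟩
      · omega
      · have := ih j hj; omega
    · rcases hi with ⟨j, hj, rfl⟩
      have := ih j hj; omega

lemma pvIdxs_length (ls : List String) : (pvIdxs ls).length = (ls.filter pvIsHline).length := by
  induction ls with
  | nil => simp [pvIdxs, pvIdxsF_nil]
  | cons l ls ih =>
    rw [pvIdxs_cons]
    by_cases h : pvIsHline l <;> simp [h, ih]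

lemma pvIdxs_nil_no_hline (ls : List String) (h : pvIdxs ls = []) :
    ∀ l ∈ ls, pvIsHline l = false := by
  have hlen := pvIdxs_length ls
  rw [h] at hlen
  have hfil : ls.filter pvIsHline = [] :=
    List.eq_nil_of_length_eq_zero hlen.symm
  intro l hl
  by_contra hc
  have : l ∈ ls.filter pvIsHline := List.mem_filter.mpr ⟨hl, by simpa using hc⟩
  rw [hfil] at this
  simp at this

lemma pvGo_nohline (t : Nat) (ls : List String) (seen : Nat)
    (h : ∀ l ∈ ls, pvIsHline l = false) : pvGo t ls seen = ls := by
  induction ls generalizing seen with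
  | nil => rfl
  | cons l ls ih =>
    have h1 : pvIsHline l = false := h l (by simp)
    simp [pvGo, h1, ih seen (fun x hx => h x (by simp [hx]))]

lemma pvGo_ge3_done (t : Nat) (ht : 3 ≤ t) (ls : List String) :
    ∀ seen, 3 ≤ seen → pvGo t ls seen = ls := by
  induction ls with
  | nil => intro seen _; rfl
  | cons l ls ih =>
    intro seen hs
    by_cases h : pvIsHline l
    · simp [pvGo, h, pvRepl, ht, show seen ≠ 0 by omega, show seen ≠ 1 by omega,
        show seen ≠ 2 by omega, ih (seen + 1) (by omega)]
    · simp [pvGo, h, ih seen hs]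

lemma pvGo_le1 (t : Nat) (ht : t ≤ 1) (ls : List String) (seen : Nat) : pvGo t ls seen = ls := by
  induction ls generalizing seen with
  | nil => rfl
  | cons l ls ih =>
    by_cases h : pvIsHline l <;>
      simp [pvGo, h, pvRepl, ih, show ¬ 3 ≤ t by omega, show t ≠ 2 by omega]

lemma pvGo3_bot (t : Nat) (ht : 3 ≤ t) (ls : List String) (j : Int) (rest : List Int)
    (h : pvIdxs ls = j :: rest) : pvGo t ls 2 = ls.set j.toNat "\\bottomrule" := by
  induction ls generalizing j rest with
  | nil => simp [pvIdxs, pvIdxsF_nil] at h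
  | cons l ls ih =>
    rw [pvIdxs_cons] at h
    by_cases hl : pvIsHline l
    · rw [if_pos hl] at h
      injection h with h0 h1
      simp [pvGo, hl, pvRepl, ht, ← h0, pvGo_ge3_done t ht ls 3 (by omega)]
    · rw [if_neg hl] at h
      cases hidx : pvIdxs ls with
      | nil => rw [hidx] at h; simp at h
      | cons j' rest' =>
        rw [hidx] at h
        simp only [List.map_cons] at h
        injection h with h0 h1
        have hj'0 : 0 ≤ j' := pvIdxs_nonneg ls j' (by rw [hidx]; simp)
        have e : j.toNat = j'.toNat + 1 := by omega
        simp [pvGo, hl, e, ih j' rest' hidx]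

lemma pvGo3_mid (t : Nat) (ht : 3 ≤ t) (ls : List String) (j1 j2 : Int) (rest : List Int)
    (h : pvIdxs ls = j1 :: j2 :: rest) :
    pvGo t ls 1 = (ls.set j1.toNat "\\midrule").set j2.toNat "\\bottomrule" := by
  induction ls generalizing j1 j2 rest with
  | nil => simp [pvIdxs, pvIdxsF_nil] at h
  | cons l ls ih =>
    rw [pvIdxs_cons] at h
    by_cases hl : pvIsHline l
    · rw [if_pos hl] at h
      injection h with h0 h1
      cases hidx : pvIdxs ls with
      | nil => rw [hidx] at h1; simp at h1
      | cons j' rest' =>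
        rw [hidx] at h1
        simp only [List.map_cons] at h1
        injection h1 with h2 h3
        have hj'0 : 0 ≤ j' := pvIdxs_nonneg ls j' (by rw [hidx]; simp)
        have e : j2.toNat = j'.toNat + 1 := by omega
        simp [pvGo, hl, pvRepl, ht, ← h0, e, pvGo3_bot t ht ls j' rest' hidx]
    · rw [if_neg hl] at h
      cases hidx : pvIdxs ls with
      | nil => rw [hidx] at h; simp at h
      | cons j' rest' =>
        rw [hidx] at h
        cases rest' with
        | nil => simp at h
        | cons j'' rest'' =>
          simp only [List.map_cons, List.cons.injEq] at h
          obtain ⟨h0, h2, h3⟩ := h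
          have hj'0 : 0 ≤ j' := pvIdxs_nonneg ls j' (by rw [hidx]; simp)
          have hj''0 : 0 ≤ j'' := pvIdxs_nonneg ls j'' (by rw [hidx]; simp)
          have e1 : j1.toNat = j'.toNat + 1 := by omega
          have e2 : j2.toNat = j''.toNat + 1 := by omega
          simp [pvGo, hl, e1, e2, ih j' j'' rest'' hidx]

lemma pvGo3_top (t : Nat) (ht : 3 ≤ t) (ls : List String) (j0 j1 j2 : Int) (rest : List Int)
    (h : pvIdxs ls = j0 :: j1 :: j2 :: rest) :
    pvGo t ls 0 =
      ((ls.set j0.toNat "\\toprule").set j1.toNat "\\midrule").set j2.toNat "\\bottomrule" := by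
  induction ls generalizing j0 j1 j2 rest with
  | nil => simp [pvIdxs, pvIdxsF_nil] at h
  | cons l ls ih =>
    rw [pvIdxs_cons] at h
    by_cases hl : pvIsHline l
    · rw [if_pos hl] at h
      injection h with h0 h1
      cases hidx : pvIdxs ls with
      | nil => rw [hidx] at h1; simp at h1
      | cons j' rest' =>
        rw [hidx] at h1
        cases rest' with
        | nil => simp at h1
        | cons j'' rest'' =>
          simp only [List.map_cons, List.cons.injEq] at h1
          obtain ⟨h2, h4, h5⟩ := h1
          have hj'0 : 0 ≤ j' := pvIdxs_nonneg ls j' (by rw [hidx]; simp)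
          have hj''0 : 0 ≤ j'' := pvIdxs_nonneg ls j'' (by rw [hidx]; simp)
          have e1 : j1.toNat = j'.toNat + 1 := by omega
          have e2 : j2.toNat = j''.toNat + 1 := by omega
          simp [pvGo, hl, pvRepl, ht, ← h0, e1, e2, pvGo3_mid t ht ls j' j'' rest'' hidx]
    · rw [if_neg hl] at h
      cases hidx : pvIdxs ls with
      | nil => rw [hidx] at h; simp at h
      | cons a as =>
        rw [hidx] at h
        cases as with
        | nil => simp at h
        | cons b bs =>
          cases bs with
          | nil => simp at h
          | cons c cs =>
            simp only [List.map_cons, List.cons.injEq] at h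
            obtain ⟨h0, h2, h4, h5⟩ := h
            have ha0 : 0 ≤ a := pvIdxs_nonneg ls a (by rw [hidx]; simp)
            have hb0 : 0 ≤ b := pvIdxs_nonneg ls b (by rw [hidx]; simp)
            have hc0 : 0 ≤ c := pvIdxs_nonneg ls c (by rw [hidx]; simp)
            have e0 : j0.toNat = a.toNat + 1 := by omega
            have e1 : j1.toNat = b.toNat + 1 := by omega
            have e2 : j2.toNat = c.toNat + 1 := by omega
            simp [pvGo, hl, e0, e1, e2, ih a b c cs hidx]

lemma pvGo2_bot (ls : List String) (j : Int) (h : pvIdxs ls = [j]) :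
    pvGo 2 ls 1 = ls.set j.toNat "\\bottomrule" := by
  induction ls generalizing j with
  | nil => simp [pvIdxs, pvIdxsF_nil] at h
  | cons l ls ih =>
    rw [pvIdxs_cons] at h
    by_cases hl : pvIsHline l
    · rw [if_pos hl] at h
      injection h with h0 h1
      have hnil : pvIdxs ls = [] := by simpa using h1
      simp [pvGo, hl, pvRepl, ← h0,
        pvGo_nohline 2 ls 2 (pvIdxs_nil_no_hline ls hnil)]
    · rw [if_neg hl] at h
      cases hidx : pvIdxs ls with
      | nil => rw [hidx] at h; simp at h
      | cons j' rest' =>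
        rw [hidx] at h
        simp only [List.map_cons] at h
        injection h with h0 h1
        have hrest : rest' = [] := by simpa using h1
        subst hrest
        have hj'0 : 0 ≤ j' := pvIdxs_nonneg ls j' (by rw [hidx]; simp)
        have e : j.toNat = j'.toNat + 1 := by omega
        simp [pvGo, hl, e, ih j' hidx]

lemma pvGo2_top (ls : List String) (j0 j1 : Int) (h : pvIdxs ls = [j0, j1]) :
    pvGo 2 ls 0 = (ls.set j0.toNat "\\toprule").set j1.toNat "\\bottomrule" := by
  induction ls generalizing j0 j1 with
  | nil => simp [pvIdxs, pvIdxsF_nil] at h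
  | cons l ls ih =>
    rw [pvIdxs_cons] at h
    by_cases hl : pvIsHline l
    · rw [if_pos hl] at h
      injection h with h0 h1
      cases hidx : pvIdxs ls with
      | nil => rw [hidx] at h1; simp at h1
      | cons j' rest' =>
        rw [hidx] at h1
        simp only [List.map_cons] at h1
        injection h1 with h2 h3
        have hrest : rest' = [] := by simpa using h3
        subst hrest
        have hj'0 : 0 ≤ j' := pvIdxs_nonneg ls j' (by rw [hidx]; simp)
        have e : j1.toNat = j'.toNat + 1 := by omega
        simp [pvGo, hl, pvRepl, ← h0, e, pvGo2_bot ls j' hidx]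
    · rw [if_neg hl] at h
      cases hidx : pvIdxs ls with
      | nil => rw [hidx] at h; simp at h
      | cons a as =>
        rw [hidx] at h
        cases as with
        | nil => simp at h
        | cons b bs =>
          simp only [List.map_cons, List.cons.injEq] at h
          obtain ⟨h0, h2, h3⟩ := h
          have hbs : bs = [] := by simpa using h3
          subst hbs
          have ha0 : 0 ≤ a := pvIdxs_nonneg ls a (by rw [hidx]; simp)
          have hb0 : 0 ≤ b := pvIdxs_nonneg ls b (by rw [hidx]; simp)
          have e0 : j0.toNat = a.toNat + 1 := by omega
          have e1 : j1.toNat = b.toNat + 1 := by omega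
          simp [pvGo, hl, e0, e1, ih a b hidx]

lemma pvMain (lines : List String) :
    (match pvIdxs lines with
      | i0 :: i1 :: i2 :: _ =>
          ((lines.set i0.toNat "\\toprule").set i1.toNat "\\midrule").set i2.toNat "\\bottomrule"
      | [i0, i1] => (lines.set i0.toNat "\\toprule").set i1.toNat "\\bottomrule"
      | _ => lines)
    = pvGo ((lines.filter pvIsHline).length) lines 0 := by
  have hlen := pvIdxs_length lines
  rcases hidx : pvIdxs lines with _ | ⟨a, _ | ⟨b, _ | ⟨c, cs⟩⟩⟩ <;> rw [hidx] at hlen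
  · exact (pvGo_le1 _ (by simp at hlen; omega) lines 0).symm
  · exact (pvGo_le1 _ (by simp at hlen; omega) lines 0).symm
  · have h2 : (lines.filter pvIsHline).length = 2 := by simp at hlen; omega
    rw [h2]
    exact (pvGo2_top lines a b hidx).symm
  · have h3 : 3 ≤ (lines.filter pvIsHline).length := by
      rw [← hlen]; simp
    exact (pvGo3_top _ h3 lines a b c cs hidx).symm

-- ===== VERDICT (by name: the statement is the Claim_ definition above) =====
theorem to_booktabs_spec : Claim_equal_to_booktabs := by
  intro body _
  exact congrArg (PySem.Str.join "\n") (pvMain ((PySem.Str.split? body "\n").getD []))
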